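-- pv_equiv track=rewrite | github.com/codydjango/algorithms | adjacent-numbers.py | find_path_for
-- ===== SOURCE A (Python) =====
-- def find_step(grid, target, col, row):
--     if col < 0 or row < 0:
--         return (False, None, None)
--
--     try:
--         if grid[col][row] == target:
--             return (True, col, row)
--         return (False, None, None)
--     except IndexError:
--         return (False, None, None)
--
-- def find_path_for(grid, start, col, row, current_path, cache):
--     target = start + 1
--
--     results = list(filter(lambda f: f[0], [find_step(grid, target, p_col, p_row) for p_col, p_row in [
--         (col, row - 1),
--         (col + 1, row),
--         (col, row + 1),
--         (col - 1, row)]]))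
--
--     if results:
--         if target in cache.keys():
--             return current_path + cache[target]
--
--         current_path.append(target)
--         return find_path_for(grid, start + 1, results[0][1], results[0][2], current_path, cache)
--
--     cache[current_path[0]] = current_path
--     return cache[current_path[0]]
-- ===== SOURCE B (Python) =====
-- def find_path_for(grid, start, col, row, current_path, cache):
--     t = start + 1
--     path = current_path
--     while True:
--         pos = None
--         for cc, rr in ((col, row - 1), (col + 1, row), (col, row + 1), (col - 1, row)):
--             if 0 <= cc < len(grid) and 0 <= rr < len(grid[cc]) and grid[cc][rr] == t:
--                 pos = (cc, rr)
--                 break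
--         if pos is None:
--             cache[path[0]] = path
--             return path
--         if t in cache:
--             return path + cache[t]
--         path.append(t)
--         col, row = pos
--         t += 1
-- ===== Notes on version B (the rewrite author's own statement) =====
-- stated objective: simpler
-- what changed: The recursion with a find_step tuple helper, list comprehension and filter is replaced by a single iterative while-loop that scans the four neighbours directly with explicit bounds checks (no exception handling, no intermediate tuple lists); same traversal, different decomposition, and B cannot hit Python's recursion limit on long chains.
import Mathlib
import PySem

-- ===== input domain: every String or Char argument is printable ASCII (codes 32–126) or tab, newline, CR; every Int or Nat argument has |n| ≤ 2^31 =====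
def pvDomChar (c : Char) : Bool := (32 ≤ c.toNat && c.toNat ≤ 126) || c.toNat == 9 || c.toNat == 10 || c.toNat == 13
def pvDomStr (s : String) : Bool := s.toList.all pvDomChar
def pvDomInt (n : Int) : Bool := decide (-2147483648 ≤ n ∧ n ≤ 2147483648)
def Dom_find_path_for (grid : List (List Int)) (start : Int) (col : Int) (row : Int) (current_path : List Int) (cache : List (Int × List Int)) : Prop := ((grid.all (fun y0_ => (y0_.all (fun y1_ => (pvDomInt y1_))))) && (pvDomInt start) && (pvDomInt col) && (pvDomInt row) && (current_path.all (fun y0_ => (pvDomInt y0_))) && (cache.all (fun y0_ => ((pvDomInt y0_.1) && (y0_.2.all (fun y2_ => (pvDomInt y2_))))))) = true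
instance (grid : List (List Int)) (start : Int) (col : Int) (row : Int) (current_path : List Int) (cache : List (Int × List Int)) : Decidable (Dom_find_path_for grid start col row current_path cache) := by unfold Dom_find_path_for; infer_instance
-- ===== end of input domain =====

-- B replaces A's recursion + find_step tuple/filter machinery by one iterative loop with a direct
-- bounds-checked neighbour search (objective: simpler decomposition; same traversal and cost).
-- Both A and B mutate current_path (append) and cache (one store) in place; the equivalence proved
-- here is about the RETURN value only (the Python mutations are identical in both).
-- Both ports use a fuel counter as a pure totality guard: each step moves to a cell holding
-- start+1, so start strictly increases and recursion stops once start+1 exceeds the largest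
-- grid value; the fuel (max grid value + 1 - start) + 1 therefore never runs out.

-- ===== PORT A =====
def find_step (grid : List (List Int)) (target : Int) (col : Int) (row : Int) :
    Bool × Option Int × Option Int :=
  if col < 0 || row < 0 then (false, none, none)
  else
    match PySem.List.pyGet? grid col with
    | none => (false, none, none)                -- IndexError on grid[col]
    | some r =>
      match PySem.List.pyGet? r row with
      | none => (false, none, none)              -- IndexError on grid[col][row]
      | some v => if v == target then (true, some col, some row) else (false, none, none)

def find_path_for_fuel (fuel : Nat) (grid : List (List Int)) (start : Int) (col : Int)
    (row : Int) (current_path : List Int) (cache : List (Int × List Int)) : List Int :=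
  match fuel with
  | 0 => []                                      -- never reached: fuel exceeds the chain length
  | fuel + 1 =>
    match ([(col, row - 1), (col + 1, row), (col, row + 1), (col - 1, row)].map
        (fun p => find_step grid (start + 1) p.1 p.2)).filter (fun f => f.1) with
    | r :: _ =>
      if ((PySem.Dict.mk cache).get? (start + 1)).isSome then
        current_path ++ (PySem.Dict.mk cache).getD (start + 1) []
      else
        find_path_for_fuel fuel grid (start + 1) (r.2.1.getD 0) (r.2.2.getD 0)
          (current_path ++ [start + 1]) cache
    | [] =>
      ((PySem.Dict.mk cache).insert ((PySem.List.pyGet? current_path 0).getD 0) current_path).getD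
        ((PySem.List.pyGet? current_path 0).getD 0) []

def find_path_for (grid : List (List Int)) (start : Int) (col : Int) (row : Int)
    (current_path : List Int) (cache : List (Int × List Int)) : List Int :=
  find_path_for_fuel ((grid.flatten.foldl max 0 + 1 - start).toNat + 1)
    grid start col row current_path cache

-- ===== PORT B =====
-- exact port of B's condition '0 <= cc < len(grid) and 0 <= rr < len(grid[cc]) and grid[cc][rr] == t'
-- (grid[cc] is fetched via pyGet?; the bounds guards make the two reads total exactly as in B)
def cell_is (grid : List (List Int)) (t : Int) (c : Int) (r : Int) : Bool :=
  match PySem.List.pyGet? grid c with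
  | some w => decide (0 ≤ c) && decide (c < grid.length) && decide (0 ≤ r) &&
      decide (r < w.length) && (PySem.List.pyGet? w r == some t)
  | none => false

def next_pos (grid : List (List Int)) (t : Int) (c : Int) (r : Int) : Option (Int × Int) :=
  [(c, r - 1), (c + 1, r), (c, r + 1), (c - 1, r)].find? (fun p => cell_is grid t p.1 p.2)

def fpf_loop (fuel : Nat) (grid : List (List Int)) (t : Int) (col : Int) (row : Int)
    (path : List Int) (cache : List (Int × List Int)) : List Int :=
  match fuel with
  | 0 => []                                      -- never reached: fuel exceeds the chain length
  | fuel + 1 =>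
    match next_pos grid t col row with
    | none =>
      ((PySem.Dict.mk cache).insert ((PySem.List.pyGet? path 0).getD 0) path).getD
        ((PySem.List.pyGet? path 0).getD 0) []
    | some p =>
      if ((PySem.Dict.mk cache).get? t).isSome then path ++ (PySem.Dict.mk cache).getD t []
      else fpf_loop fuel grid (t + 1) p.1 p.2 (path ++ [t]) cache

def find_path_for_alt (grid : List (List Int)) (start : Int) (col : Int) (row : Int)
    (current_path : List Int) (cache : List (Int × List Int)) : List Int :=
  fpf_loop ((grid.flatten.foldl max 0 + 1 - start).toNat + 1)
    grid (start + 1) col row current_path cache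

-- ===== PRECONDITION & SPEC =====
-- helper for Pre_ only (independent of both ports): does grid hold value t at (c, r)?
def pvHit (grid : List (List Int)) (t : Int) (c : Int) (r : Int) : Bool :=
  decide (0 ≤ c) && decide (0 ≤ r) &&
    ((PySem.List.pyGet? grid c).bind (fun w => PySem.List.pyGet? w r) == some t)

-- Pre_ excludes exactly the inputs on which Python A raises IndexError (current_path[0] with
-- current_path empty and no neighbour of (col,row) holding start+1); Python B raises there too.
def Pre_find_path_for (grid : List (List Int)) (start : Int) (col : Int) (row : Int)
    (current_path : List Int) (cache : List (Int × List Int)) : Prop :=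
  current_path ≠ [] ∨
    (pvHit grid (start + 1) col (row - 1) || pvHit grid (start + 1) (col + 1) row ||
     pvHit grid (start + 1) col (row + 1) || pvHit grid (start + 1) (col - 1) row) = true
instance (grid : List (List Int)) (start : Int) (col : Int) (row : Int) (current_path : List Int) (cache : List (Int × List Int)) : Decidable (Pre_find_path_for grid start col row current_path cache) := by unfold Pre_find_path_for; infer_instance

def pvWitness_find_path_for : List (List Int) × Int × Int × Int × List Int × (List (Int × List Int)) :=
  ([[1, 2], [4, 3]], 0, 0, 0, [0], [])

def Spec_find_path_for (grid : List (List Int)) (start : Int) (col : Int) (row : Int) (current_path : List Int) (cache : List (Int × List Int)) (out : List Int) : Prop := out = find_path_for_alt grid start col row current_path cache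
instance (grid : List (List Int)) (start : Int) (col : Int) (row : Int) (current_path : List Int) (cache : List (Int × List Int)) (out : List Int) : Decidable (Spec_find_path_for grid start col row current_path cache out) := by unfold Spec_find_path_for; infer_instance

-- ===== CLAIM (what is proved, stated in full; the proofs are below) =====
def Claim_equal_find_path_for : Prop := ∀ (grid : List (List Int)) (start : Int) (col : Int) (row : Int) (current_path : List Int) (cache : List (Int × List Int)), Dom_find_path_for grid start col row current_path cache → Pre_find_path_for grid start col row current_path cache → Spec_find_path_for grid start col row current_path cache (find_path_for grid start col row current_path cache)

-- ===== LEMMAS AND PROOFS =====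
theorem pvWitness_ok :
    Dom_find_path_for pvWitness_find_path_for.1 pvWitness_find_path_for.2.1
      pvWitness_find_path_for.2.2.1 pvWitness_find_path_for.2.2.2.1
      pvWitness_find_path_for.2.2.2.2.1 pvWitness_find_path_for.2.2.2.2.2 ∧
    Pre_find_path_for pvWitness_find_path_for.1 pvWitness_find_path_for.2.1
      pvWitness_find_path_for.2.2.1 pvWitness_find_path_for.2.2.2.1
      pvWitness_find_path_for.2.2.2.2.1 pvWitness_find_path_for.2.2.2.2.2 := by decide

-- each find_step value is determined by cell_is at the same position
theorem find_step_eq_cell (grid : List (List Int)) (t c r : Int) :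
    find_step grid t c r =
      if cell_is grid t c r then (true, some c, some r) else (false, none, none) := by
  unfold find_step cell_is
  rcases hg : PySem.List.pyGet? grid c with _ | w <;> simp only [hg]
  · split <;> rfl
  · rcases (PySem.List.pyGet? w r).eq_none_or_eq_some with hw | ⟨v, hw⟩ <;> simp only [hw]
    · split <;> simp
    · by_cases hc : 0 ≤ c
      · by_cases hr0 : 0 ≤ r
        · have hneg : (decide (c < 0) || decide (r < 0)) = false := by simp; omega
          have hlen : c < (grid.length : Int) := by
            rw [PySem.List.pyGet?_of_nonneg grid hc] at hg
            obtain ⟨hlt, -⟩ := List.getElem?_eq_some_iff.mp hg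
            omega
          have hlenw : r < (w.length : Int) := by
            rw [PySem.List.pyGet?_of_nonneg w hr0] at hw
            obtain ⟨hlt, -⟩ := List.getElem?_eq_some_iff.mp hw
            omega
          rw [hneg]
          simp only [hc, hr0, hlen, hlenw, decide_true, Bool.true_and]
          by_cases hv : v = t <;> simp [hv]
        · have hneg : (decide (c < 0) || decide (r < 0)) = true := by simp; omega
          rw [hneg]
          simp [hr0]
      · have hneg : (decide (c < 0) || decide (r < 0)) = true := by simp; omega
        rw [hneg]
        simp [hc]

-- the filtered results list of A against B's next_pos
theorem results_vs_next_pos (grid : List (List Int)) (t c r : Int) :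
    (next_pos grid t c r = none ∧
      ([(c, r - 1), (c + 1, r), (c, r + 1), (c - 1, r)].map
        (fun p => find_step grid t p.1 p.2)).filter (fun f => f.1) = []) ∨
    (∃ p l, next_pos grid t c r = some p ∧
      ([(c, r - 1), (c + 1, r), (c, r + 1), (c - 1, r)].map
        (fun p => find_step grid t p.1 p.2)).filter (fun f => f.1) =
          ((true : Bool), some p.1, some p.2) :: l) := by
  unfold next_pos
  by_cases h1 : cell_is grid t c (r - 1) <;>
  by_cases h2 : cell_is grid t (c + 1) r <;>
  by_cases h3 : cell_is grid t c (r + 1) <;>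
  by_cases h4 : cell_is grid t (c - 1) r <;>
    simp [find_step_eq_cell, List.filter, List.find?, h1, h2, h3, h4]

-- the two fueled programs agree step for step at EQUAL fuel
theorem fuel_eq_loop (fuel : Nat) (grid : List (List Int)) (start col row : Int)
    (path : List Int) (cache : List (Int × List Int)) :
    find_path_for_fuel fuel grid start col row path cache =
      fpf_loop fuel grid (start + 1) col row path cache := by
  induction fuel generalizing start col row path with
  | zero => rfl
  | succ n ih =>
    rw [find_path_for_fuel, fpf_loop]
    rcases results_vs_next_pos grid (start + 1) col row with ⟨hnp, hnil⟩ | ⟨p, l, hnp, hcons⟩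
    · rw [hnil, hnp]
    · rw [hcons, hnp]
      by_cases hhit : ((PySem.Dict.mk cache).get? (start + 1)).isSome
      · simp only [hhit, if_true]
      · simp only [hhit, Bool.false_eq_true, if_false, Option.getD_some]
        exact ih (start + 1) p.1 p.2 (path ++ [start + 1])

-- ===== VERDICT (by name: the statement is the Claim_ definition above) =====
theorem find_path_for_spec : Claim_equal_find_path_for := by
  intro grid start col row current_path cache _ _
  unfold Spec_find_path_for find_path_for find_path_for_alt
  exact fuel_eq_loop _ grid start col row current_path cache
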